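-- pv_equiv track=rewrite | github.com/miliar/Code_Jam_Webscraper | solutions_python/solutions_year16_round4_nr1/227.py | check
-- ===== SOURCE A (Python) =====
-- winner = {
--     'pr': 'p',
--     'ps': 's',
--     'rp': 'p',
--     'rs': 'r',
--     'sp': 's',
--     'sr': 'r'
-- }
--
-- def check(pairs):
--
--     try:
--         x = [winner[p] for p in pairs]
--         if len(x) == 1:
--             return True
--         new =[x[2*i]+x[2*i+1] for i in range(len(x)//2)]
--         return check(new);
--     except KeyError:
--         return False
-- ===== SOURCE B (Python) =====
-- winner = {
--     'pr': 'p',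
--     'ps': 's',
--     'rp': 'p',
--     'rs': 'r',
--     'sp': 's',
--     'sr': 'r'
-- }
--
-- def _level(ps):
--     # look up each pair's winner; None if some pair is invalid
--     x = []
--     for p in ps:
--         w = winner.get(p)
--         if w is None:
--             return None
--         x.append(w)
--     return x
--
-- def check(pairs):
--     x = _level(pairs)
--     if x is None:
--         return False
--     while len(x) > 1:
--         x = _level([x[2 * i] + x[2 * i + 1] for i in range(len(x) // 2)])
--         if x is None:
--             return False
--     return True
-- ===== Notes on version B (the rewrite author's own statement) =====
-- stated objective: simpler
-- what changed: Replaced A's try/except-driven recursion with an iterative while-loop that keeps the current round's winner list, using explicit dict.get lookups instead of catching KeyError.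
import Mathlib
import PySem

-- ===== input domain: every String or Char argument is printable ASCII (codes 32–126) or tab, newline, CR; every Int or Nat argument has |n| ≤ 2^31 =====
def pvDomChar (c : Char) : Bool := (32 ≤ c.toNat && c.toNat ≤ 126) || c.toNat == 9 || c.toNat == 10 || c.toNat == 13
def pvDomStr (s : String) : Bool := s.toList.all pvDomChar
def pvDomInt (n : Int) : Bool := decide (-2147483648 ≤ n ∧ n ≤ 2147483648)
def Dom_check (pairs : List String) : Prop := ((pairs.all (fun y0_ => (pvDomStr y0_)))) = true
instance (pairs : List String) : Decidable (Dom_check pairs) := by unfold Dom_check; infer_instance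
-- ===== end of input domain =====

-- B replaces A's try/except recursion by an iterative level-by-level loop with explicit
-- Option-valued lookups (objective: simpler/idiomatic control flow; same asymptotic cost).

-- the module-level `winner` dict (shared context of both Pythons)
def pvWinner : PySem.Dict String String :=
  PySem.Dict.ofList [("pr","p"),("ps","s"),("rp","p"),("rs","r"),("sp","s"),("sr","r")]

-- the comprehension [x[2*i]+x[2*i+1] for i in range(len(x)//2)], identical in both Pythons
def pvNext (x : List String) : List String :=
  (List.range (x.length / 2)).map
    (fun i => PySem.List.pyGetD x ((2 * i : Nat) : Int) "" ++ PySem.List.pyGetD x ((2 * i + 1 : Nat) : Int) "")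

theorem pvNext_length (x : List String) : (pvNext x).length = x.length / 2 := by
  simp [pvNext]

-- ===== PORT A =====
-- helper for the termination measure of `check` (length of mapM over Option)
theorem pvMapM_length {α β : Type} (f : α → Option β) :
    ∀ (ps : List α) (x : List β), ps.mapM f = some x → x.length = ps.length := by
  intro ps
  induction ps with
  | nil => intro x h; simp only [List.mapM_nil, Option.pure_def, Option.some.injEq] at h; simp [← h]
  | cons p rest ih =>
    intro x h
    rcases hp : f p with _ | w <;> simp [List.mapM_cons, hp] at h
    rcases hr : rest.mapM f with _ | r <;> simp [hr] at h
    simp [← h, ih r hr]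

def check (pairs : List String) : Bool :=
  if pairs = [] then false   -- Python A never returns here (unbounded recursion); outside Pre_check
  else
    match hx : pairs.mapM (fun p => pvWinner.get? p) with   -- [winner[p] for p in pairs]; none = KeyError → False
    | none => false
    | some x =>
      if x.length = 1 then true
      else check (pvNext x)
termination_by pairs.length
decreasing_by
  have hlen := pvMapM_length (fun p => pvWinner.get? p) pairs x hx
  have hne : pairs.length ≠ 0 := by simpa [List.length_eq_zero_iff] using ‹¬ pairs = []›
  rw [pvNext_length, hlen]
  omega

-- ===== PORT B =====
-- _level: look up each pair's winner into an accumulator; none if some pair is invalid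
def pvLevel : List String → List String → Option (List String)
  | [], acc => some acc
  | p :: rest, acc =>
    match pvWinner.get? p with
    | none => none
    | some w => pvLevel rest (acc ++ [w])

theorem pvLevel_length : ∀ (ps acc r : List String),
    pvLevel ps acc = some r → r.length = acc.length + ps.length := by
  intro ps
  induction ps with
  | nil => intro acc r h; simp [pvLevel] at h; simp [← h]
  | cons p rest ih =>
    intro acc r h
    rcases hp : pvWinner.get? p with _ | w <;> simp [pvLevel, hp] at h
    have := ih (acc ++ [w]) r h
    simp [List.length_append] at this
    simp [List.length_cons]
    omega

-- the while-loop of B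
def pvCheckLoop (x : List String) : Bool :=
  if 1 < x.length then
    match hx : pvLevel (pvNext x) [] with
    | none => false
    | some x' => pvCheckLoop x'
  else true
termination_by x.length
decreasing_by
  have := pvLevel_length (pvNext x) [] x' hx
  rw [pvNext_length] at this
  simp at this
  omega

def check_alt (pairs : List String) : Bool :=
  match pvLevel pairs [] with
  | none => false
  | some x => pvCheckLoop x

-- ===== PRECONDITION & SPEC =====
-- Pre_check excludes only the empty list, on which Python A recurses forever and raises RecursionError (B returns True there).
def Pre_check (pairs : List String) : Prop := pairs ≠ []
instance (pairs : List String) : Decidable (Pre_check pairs) := by unfold Pre_check; infer_instance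
def pvWitness_check : List String := (["pr"])

def Spec_check (pairs : List String) (out : Bool) : Prop := out = check_alt pairs
instance (pairs : List String) (out : Bool) : Decidable (Spec_check pairs out) := by unfold Spec_check; infer_instance

-- ===== CLAIM (what is proved, stated in full; the proofs are below) =====
def Claim_equal_check : Prop := ∀ (pairs : List String), Dom_check pairs → Pre_check pairs → Spec_check pairs (check pairs)

-- ===== LEMMAS AND PROOFS =====

-- B's accumulator loop is mapM with the accumulator appended in front
theorem pvLevel_eq_mapM : ∀ (ps acc : List String),
    pvLevel ps acc = (ps.mapM (fun p => pvWinner.get? p)).map (fun r => acc ++ r) := by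
  intro ps
  induction ps with
  | nil => intro acc; simp [pvLevel, List.mapM_nil]
  | cons p rest ih =>
    intro acc
    rcases hp : pvWinner.get? p with _ | w <;>
      simp [pvLevel, hp, List.mapM_cons, ih, Option.map_map]
    rcases rest.mapM (fun p => pvWinner.get? p) with _ | r <;> simp

theorem pvMain : ∀ (n : Nat) (pairs : List String), pairs.length ≤ n → pairs ≠ [] →
    check pairs = check_alt pairs := by
  intro n
  induction n with
  | zero => intro pairs h hne; cases pairs <;> simp at h hne
  | succ n ih =>
    intro pairs h hne
    rw [check, if_neg hne]
    rcases hx : pairs.mapM (fun p => pvWinner.get? p) with _ | x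
    · simp [check_alt, pvLevel_eq_mapM, hx]
    · have hlen := pvMapM_length (fun p => pvWinner.get? p) pairs x hx
      have hx0 : x ≠ [] := by
        intro hx0
        exact hne (List.length_eq_zero_iff.mp (by simp [← hlen, hx0]))
      have halt : check_alt pairs = pvCheckLoop x := by
        simp [check_alt, pvLevel_eq_mapM, hx]
      by_cases h1 : x.length = 1
      · simp [halt, pvCheckLoop, h1]
      · have h2 : 1 < x.length := by
          have : x.length ≠ 0 := by simpa [List.length_eq_zero_iff] using hx0
          omega
        simp only [h1, if_false]
        rw [halt, pvCheckLoop, if_pos h2]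
        have hnl : (pvNext x).length = x.length / 2 := pvNext_length x
        have hnn : pvNext x ≠ [] := by
          intro h0
          rw [h0] at hnl
          simp at hnl
          omega
        have hle : (pvNext x).length ≤ n := by
          rw [hnl, hlen]
          have := h
          omega
        rw [ih (pvNext x) hle hnn, check_alt, pvLevel_eq_mapM (pvNext x) []]
        rcases (pvNext x).mapM (fun p => pvWinner.get? p) with _ | x' <;> simp

-- ===== VERDICT (by name: the statement is the Claim_ definition above) =====
theorem check_spec : Claim_equal_check := by
  intro pairs _ hpre
  unfold Spec_check
  exact pvMain pairs.length pairs le_rfl hpre
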